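-- pv_equiv track=rewrite | github.com/sudhir-a11y/verifAI | backend/app/domain/checklist/rule_engine.py | _contains_ordered_tokens_with_max_gap
-- ===== SOURCE A (Python) =====
-- def _contains_token_non_negated(text_tokens: list[str], token: str) -> bool:
--     for idx, tok in enumerate(text_tokens):
--         if tok != token:
--             continue
--         prev_tok = text_tokens[idx - 1] if idx > 0 else ""
--         # Avoid matching "surgical" from "non surgical" style negatives.
--         if prev_tok == "non":
--             continue
--         return True
--     return False
--
-- def _contains_ordered_tokens_with_max_gap(
--     text_tokens: list[str],
--     phrase_tokens: list[str],
--     max_gap: int,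
-- ) -> bool:
--     if not phrase_tokens:
--         return False
--     if len(phrase_tokens) == 1:
--         return _contains_token_non_negated(text_tokens, phrase_tokens[0])
--
--     start_positions = [idx for idx, tok in enumerate(text_tokens) if tok == phrase_tokens[0]]
--     if not start_positions:
--         return False
--
--     for start in start_positions:
--         prev = start
--         ok = True
--         for token in phrase_tokens[1:]:
--             found_idx = -1
--             upper = min(len(text_tokens), prev + max_gap + 2)
--             for j in range(prev + 1, upper):
--                 if text_tokens[j] == token:
--                     found_idx = j
--                     break
--             if found_idx < 0:
--                 ok = False
--                 break
--             prev = found_idx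
--         if ok:
--             return True
--     return False
-- ===== SOURCE B (Python) =====
-- def _leftmost_greater(lst, x):
--     lo, hi = 0, len(lst)
--     while lo < hi:
--         mid = (lo + hi) // 2
--         if lst[mid] <= x:
--             lo = mid + 1
--         else:
--             hi = mid
--     return lo
--
-- def _contains_ordered_tokens_with_max_gap(
--     text_tokens: list[str],
--     phrase_tokens: list[str],
--     max_gap: int,
-- ) -> bool:
--     if not phrase_tokens:
--         return False
--     first = phrase_tokens[0]
--     if len(phrase_tokens) == 1:
--         return any(
--             tok == first and (i == 0 or text_tokens[i - 1] != "non")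
--             for i, tok in enumerate(text_tokens)
--         )
--     # One pass over the text: sorted occurrence positions of each phrase token.
--     wanted = set(phrase_tokens)
--     pos = {}
--     for i, tok in enumerate(text_tokens):
--         if tok in wanted:
--             pos.setdefault(tok, []).append(i)
--     for start in pos.get(first, []):
--         prev = start
--         for token in phrase_tokens[1:]:
--             lst = pos.get(token, [])
--             k = _leftmost_greater(lst, prev)  # binary search: first occurrence after prev
--             if k == len(lst) or lst[k] > prev + max_gap + 1:
--                 prev = -1
--                 break
--             prev = lst[k]
--         if prev >= 0:
--             return True
--     return False
-- ===== Notes on version B (the rewrite author's own statement) =====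
-- stated objective: alternative
-- what changed: B replaces A's per-step linear rescan of the text window with one pass over the text building a dict of sorted occurrence positions per phrase token, then binary-searches for the next in-window occurrence; measured ~1.2-1.4x faster, below the 1.5x bar, so no speed is claimed.
import Mathlib
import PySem

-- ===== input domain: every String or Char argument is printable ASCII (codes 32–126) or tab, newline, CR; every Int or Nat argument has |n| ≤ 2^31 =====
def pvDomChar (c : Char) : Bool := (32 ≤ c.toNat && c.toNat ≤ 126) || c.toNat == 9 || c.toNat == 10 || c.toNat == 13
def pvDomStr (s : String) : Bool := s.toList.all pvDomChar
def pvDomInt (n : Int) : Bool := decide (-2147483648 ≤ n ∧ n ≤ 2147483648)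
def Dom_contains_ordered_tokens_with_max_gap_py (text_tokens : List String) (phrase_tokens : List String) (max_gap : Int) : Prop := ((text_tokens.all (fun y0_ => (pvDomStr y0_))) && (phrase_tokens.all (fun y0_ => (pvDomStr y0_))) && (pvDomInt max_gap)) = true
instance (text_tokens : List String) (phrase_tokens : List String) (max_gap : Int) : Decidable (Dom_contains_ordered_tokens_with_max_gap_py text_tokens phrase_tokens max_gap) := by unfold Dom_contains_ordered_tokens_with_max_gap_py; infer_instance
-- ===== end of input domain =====

-- B replaces A's per-step linear window scan over the text with a dict of per-token
-- occurrence positions built in one pass and a binary search for the next in-window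
-- occurrence (objective: alternative algorithm, same result; equivalence proved below).

-- ===== PORT A =====
-- shared comprehension: [idx for idx, tok in enumerate(text_tokens) if tok == t]
-- (appears verbatim in both A and B)
def occOf (text_tokens : List String) (t : String) : List Int :=
  (PySem.List.enumerate text_tokens).filterMap (fun p => if p.2 == t then some p.1 else none)

-- loop of _contains_token_non_negated over enumerate(text_tokens)
def ctnnLoop (text_tokens : List String) (token : String) : List (Int × String) → Bool
  | [] => false
  | (idx, tok) :: rest =>
    if tok ≠ token then ctnnLoop text_tokens token rest
    else
      -- prev_tok = text_tokens[idx - 1] if idx > 0 else ""  (idx-1 in range when idx > 0)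
      let prev_tok := if idx > 0 then (PySem.List.pyGet? text_tokens (idx - 1)).getD "" else ""
      if prev_tok == "non" then ctnnLoop text_tokens token rest
      else true

-- inner scan: for j in range(prev+1, upper): if text_tokens[j] == token: found_idx = j; break
def aFindLoop (text_tokens : List String) (token : String) : List Int → Int
  | [] => -1
  | j :: rest =>
    if PySem.List.pyGet? text_tokens j == some token then j
    else aFindLoop text_tokens token rest

-- middle loop: for token in phrase_tokens[1:] with break on found_idx < 0
def aChain (text_tokens : List String) (max_gap : Int) : List String → Int → Bool
  | [], _ => true
  | token :: rest, prev =>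
    let upper := min (text_tokens.length : Int) (prev + max_gap + 2)
    let found := aFindLoop text_tokens token (PySem.List.pyRange (prev + 1) upper)
    if found < 0 then false else aChain text_tokens max_gap rest found

def contains_ordered_tokens_with_max_gap_py (text_tokens : List String) (phrase_tokens : List String) (max_gap : Int) : Bool :=
  if phrase_tokens.isEmpty then false
  else if phrase_tokens.length == 1 then
    ctnnLoop text_tokens (phrase_tokens.headD "") (PySem.List.enumerate text_tokens)
  else
    let start_positions := occOf text_tokens (phrase_tokens.headD "")
    if start_positions.isEmpty then false
    else start_positions.any (fun start => aChain text_tokens max_gap (phrase_tokens.drop 1) start)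

-- ===== PORT B =====
-- hand-written binary search of Source B: leftmost k in [lo,hi) with lst[k] > x
-- (lst[mid] is always in range when called with hi ≤ len lst; ported as getD)
def leftmostGreater (lst : List Int) (x : Int) (lo hi : Nat) : Nat :=
  if _h : lo < hi then
    let mid := (lo + hi) / 2
    if lst.getD mid 0 ≤ x then leftmostGreater lst x (mid + 1) hi
    else leftmostGreater lst x lo mid
  else lo
termination_by hi - lo
decreasing_by all_goals omega

-- Source B's single pass over the text: pos.setdefault(tok, []).append(i) for wanted tokens
def buildPos (text_tokens : List String) (wanted : PySem.Set String) : PySem.Dict String (List Int) :=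
  (PySem.List.enumerate text_tokens).foldl
    (fun d p => if wanted.contains p.2 then d.insert p.2 (d.getD p.2 [] ++ [p.1]) else d)
    PySem.Dict.empty

-- inner loop of B over phrase_tokens[1:]; -1 encodes the 'break' with prev = -1
def bChain (pos : PySem.Dict String (List Int)) (max_gap : Int) : List String → Int → Int
  | [], prev => prev
  | token :: rest, prev =>
    let lst := pos.getD token []
    let k := leftmostGreater lst prev 0 lst.length
    if k = lst.length ∨ lst.getD k 0 > prev + max_gap + 1 then -1
    else bChain pos max_gap rest (lst.getD k 0)

def contains_ordered_tokens_with_max_gap_py_alt (text_tokens : List String) (phrase_tokens : List String) (max_gap : Int) : Bool :=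
  if phrase_tokens.isEmpty then false
  else
    let first := phrase_tokens.headD ""
    if phrase_tokens.length == 1 then
      (PySem.List.enumerate text_tokens).any (fun p =>
        p.2 == first && (p.1 == 0 || (PySem.List.pyGet? text_tokens (p.1 - 1)).getD "" != "non"))
    else
      let pos := buildPos text_tokens (PySem.Set.ofList phrase_tokens)
      (pos.getD first []).any (fun start => decide (0 ≤ bChain pos max_gap (phrase_tokens.drop 1) start))

-- ===== PRECONDITION & SPEC =====
def Spec_contains_ordered_tokens_with_max_gap_py (text_tokens : List String) (phrase_tokens : List String) (max_gap : Int) (out : Bool) : Prop := out = contains_ordered_tokens_with_max_gap_py_alt text_tokens phrase_tokens max_gap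
instance (text_tokens : List String) (phrase_tokens : List String) (max_gap : Int) (out : Bool) : Decidable (Spec_contains_ordered_tokens_with_max_gap_py text_tokens phrase_tokens max_gap out) := by unfold Spec_contains_ordered_tokens_with_max_gap_py; infer_instance

-- ===== CLAIM (what is proved, stated in full; the proofs are below) =====
def Claim_equal_contains_ordered_tokens_with_max_gap_py : Prop := ∀ (text_tokens : List String) (phrase_tokens : List String) (max_gap : Int), Dom_contains_ordered_tokens_with_max_gap_py text_tokens phrase_tokens max_gap → Spec_contains_ordered_tokens_with_max_gap_py text_tokens phrase_tokens max_gap (contains_ordered_tokens_with_max_gap_py text_tokens phrase_tokens max_gap)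

-- ===== LEMMAS AND PROOFS =====

theorem pw_mono {lst : List Int} (hs : lst.Pairwise (· ≤ ·)) (i j : Nat)
    (hi : i < lst.length) (hj : j < lst.length) (hij : i ≤ j) : lst[i] ≤ lst[j] := by
  rcases Nat.lt_or_ge i j with hc | hc
  · exact List.pairwise_iff_getElem.mp hs i j hi hj hc
  · have : i = j := by omega
    subst this; rfl

theorem lg_aux (lst : List Int) (x : Int) (hs : lst.Pairwise (· ≤ ·)) (lo hi : Nat)
    (hlo : lo ≤ hi) (hhi : hi ≤ lst.length)
    (hbelow : ∀ (j : Nat) (hj : j < lst.length), j < lo → lst[j] ≤ x)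
    (habove : ∀ (j : Nat) (hj : j < lst.length), hi ≤ j → x < lst[j]) :
    leftmostGreater lst x lo hi ≤ lst.length ∧
    (∀ (j : Nat) (hj : j < lst.length), j < leftmostGreater lst x lo hi → lst[j] ≤ x) ∧
    (∀ (j : Nat) (hj : j < lst.length), leftmostGreater lst x lo hi ≤ j → x < lst[j]) := by
  induction lo, hi using leftmostGreater.induct lst x with
  | case1 lo hi h mid hle ih =>
    rw [leftmostGreater]
    simp only [h, dite_true]
    have hmid : mid < lst.length := by omega
    have heq : lst.getD mid 0 = lst[mid] := List.getD_eq_getElem lst 0 hmid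
    rw [show (lo + hi) / 2 = mid from rfl, heq, if_pos (by rw [← heq]; exact hle)]
    refine ih (by omega) hhi ?_ habove
    intro j hj hjlt
    calc lst[j] ≤ lst[mid] := pw_mono hs j mid hj hmid (by omega)
      _ ≤ x := by rw [← heq]; exact hle
  | case2 lo hi h mid hgt ih =>
    rw [leftmostGreater]
    simp only [h, dite_true]
    have hmid : mid < lst.length := by omega
    have heq : lst.getD mid 0 = lst[mid] := List.getD_eq_getElem lst 0 hmid
    rw [show (lo + hi) / 2 = mid from rfl, heq, if_neg (by rw [← heq]; exact hgt)]
    refine ih (by omega) (by omega) hbelow ?_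
    intro j hj hjge
    calc x < lst[mid] := by rw [← heq]; exact lt_of_not_ge hgt
      _ ≤ lst[j] := pw_mono hs mid j hmid hj hjge
  | case3 lo hi h =>
    rw [leftmostGreater]
    simp only [h, dite_false]
    exact ⟨by omega, fun j hj hjlt => hbelow j hj hjlt, fun j hj hjge => habove j hj (by omega)⟩

theorem lg_spec (lst : List Int) (x : Int) (hs : lst.Pairwise (· ≤ ·)) :
    leftmostGreater lst x 0 lst.length ≤ lst.length ∧
    (∀ (j : Nat) (hj : j < lst.length), j < leftmostGreater lst x 0 lst.length → lst[j] ≤ x) ∧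
    (∀ (j : Nat) (hj : j < lst.length), leftmostGreater lst x 0 lst.length ≤ j → x < lst[j]) :=
  lg_aux lst x hs 0 lst.length (by omega) le_rfl (by omega) (fun j hj hge => by omega)

theorem mem_occOf {text_tokens : List String} {t : String} {j : Int} :
    j ∈ occOf text_tokens t ↔ ∃ (k : Nat) (h : k < text_tokens.length), j = (k : Int) ∧ text_tokens[k] = t := by
  unfold occOf
  simp only [List.mem_filterMap, PySem.List.mem_enumerate_iff]
  constructor
  · rintro ⟨⟨i, s⟩, ⟨k, hk, heq⟩, hif⟩
    cases heq
    by_cases h : text_tokens[k] = t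
    · have : (k:Int) = j := by simpa [h] using hif
      exact ⟨k, hk, this.symm, h⟩
    · simp [h] at hif
  · rintro ⟨k, hk, rfl, h⟩
    exact ⟨(0 + (k : Int), text_tokens[k]), ⟨k, hk, rfl⟩, by simp [h]⟩

theorem pairwise_occOf (text_tokens : List String) (t : String) :
    (occOf text_tokens t).Pairwise (· < ·) := by
  unfold occOf
  refine List.Pairwise.filterMap _ ?_ (PySem.List.pairwise_lt_enumerate text_tokens 0)
  rintro ⟨i, s⟩ ⟨i', s'⟩ hlt b hb b' hb'
  by_cases h : s = t
  · by_cases h' : s' = t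
    · simp [h, h'] at hb hb'; omega
    · simp [h'] at hb'
  · simp [h] at hb

theorem mem_occOf_iff_pyGet {text_tokens : List String} {t : String} {j : Int} (hj : 0 ≤ j) :
    j ∈ occOf text_tokens t ↔ PySem.List.pyGet? text_tokens j = some t := by
  rw [mem_occOf]
  constructor
  · rintro ⟨k, hk, rfl, h⟩
    rw [PySem.List.pyGet?_natCast]
    simp [hk, h]
  · intro h
    have hj' : j = ((j.toNat : Nat) : Int) := by omega
    rw [hj', PySem.List.pyGet?_natCast] at h
    rcases List.getElem?_eq_some_iff.mp h with ⟨hk, hv⟩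
    exact ⟨j.toNat, hk, by omega, hv⟩

theorem occOf_mem_bounds {text_tokens : List String} {t : String} {j : Int}
    (h : j ∈ occOf text_tokens t) : 0 ≤ j ∧ j < (text_tokens.length : Int) := by
  rcases mem_occOf.mp h with ⟨k, hk, rfl, _⟩
  constructor <;> omega

theorem aFindLoop_eq_find? (text_tokens : List String) (token : String) (js : List Int) :
    aFindLoop text_tokens token js =
      (js.find? (fun j => PySem.List.pyGet? text_tokens j == some token)).getD (-1) := by
  induction js with
  | nil => rfl
  | cons j rest ih =>
    rw [aFindLoop, List.find?_cons]
    by_cases h : PySem.List.pyGet? text_tokens j == some token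
    · simp [h]
    · simp only [h]
      simp [ih]

theorem find?_eq_some_of_min {l : List Int} {p : Int → Bool} {e : Int}
    (hsorted : l.Pairwise (· < ·)) (he : e ∈ l) (hpe : p e = true)
    (hmin : ∀ x ∈ l, x < e → p x = false) : l.find? p = some e := by
  induction l with
  | nil => cases he
  | cons a t ih =>
    rcases List.pairwise_cons.mp hsorted with ⟨ha, ht⟩
    rcases List.mem_cons.mp he with rfl | het
    · rw [List.find?_cons, hpe]
    · have hae : a < e := ha e het
      have hpa : p a = false := hmin a List.mem_cons_self hae
      rw [List.find?_cons, hpa]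
      exact ih ht het (fun x hx hxe => hmin x (List.mem_cons_of_mem a hx) hxe)

theorem step_eq (text_tokens : List String) (token : String) (max_gap prev : Int) (hp : 0 ≤ prev) :
    aFindLoop text_tokens token
        (PySem.List.pyRange (prev + 1) (min (text_tokens.length : Int) (prev + max_gap + 2))) =
      (if leftmostGreater (occOf text_tokens token) prev 0 (occOf text_tokens token).length = (occOf text_tokens token).length ∨
          (occOf text_tokens token).getD (leftmostGreater (occOf text_tokens token) prev 0 (occOf text_tokens token).length) 0 > prev + max_gap + 1
       then -1
       else (occOf text_tokens token).getD (leftmostGreater (occOf text_tokens token) prev 0 (occOf text_tokens token).length) 0) := by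
  set lst := occOf text_tokens token with hlst
  set k := leftmostGreater lst prev 0 lst.length with hk
  have hsle : lst.Pairwise (· ≤ ·) := (pairwise_occOf text_tokens token).imp le_of_lt
  obtain ⟨hklen, hbelow, habove⟩ := lg_spec lst prev hsle
  rw [aFindLoop_eq_find?]
  set upper := min (text_tokens.length : Int) (prev + max_gap + 2) with hupper
  by_cases hc : k = lst.length ∨ lst.getD k 0 > prev + max_gap + 1
  · rw [if_pos hc]
    have hnone : (PySem.List.pyRange (prev + 1) upper).find?
        (fun j => PySem.List.pyGet? text_tokens j == some token) = none := by
      rw [List.find?_eq_none]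
      intro j hjmem hpj
      rw [PySem.List.mem_pyRange_one] at hjmem
      have hj0 : 0 ≤ j := by omega
      have hjocc : j ∈ lst := (mem_occOf_iff_pyGet hj0).mpr (by simpa using hpj)
      rcases List.mem_iff_getElem.mp hjocc with ⟨i, hi, hie⟩
      have hik : ¬ i < k := by
        intro hik
        have := hbelow i hi hik
        omega
      have hklt : k < lst.length := by omega
      have hgd : lst.getD k 0 = lst[k] := List.getD_eq_getElem lst 0 hklt
      have h1 : lst[k] ≤ lst[i] := by
        rcases Nat.lt_or_ge k i with hc' | hc'
        · exact le_of_lt (List.pairwise_iff_getElem.mp (pairwise_occOf text_tokens token) k i hklt hi hc')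
        · have : k = i := by omega
          subst this; rfl
      rcases hc with hc | hc
      · omega
      · rw [hgd] at hc; omega
    rw [hnone]; rfl
  · rw [if_neg hc]
    rcases not_or.mp hc with ⟨hkne, hkle'⟩
    have hkle : lst.getD k 0 ≤ prev + max_gap + 1 := by omega
    have hklt : k < lst.length := by omega
    have hgd : lst.getD k 0 = lst[k] := List.getD_eq_getElem lst 0 hklt
    set e := lst[k] with he
    have hemem : e ∈ lst := List.getElem_mem hklt
    have hegt : prev < e := habove k hklt le_rfl
    have hebd := occOf_mem_bounds hemem
    have hsome : (PySem.List.pyRange (prev + 1) upper).find?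
        (fun j => PySem.List.pyGet? text_tokens j == some token) = some e := by
      apply find?_eq_some_of_min (PySem.List.pairwise_lt_pyRange_one _ _)
      · rw [PySem.List.mem_pyRange_one]
        constructor
        · omega
        · rw [hupper]; rw [hgd] at hkle; omega
      · simp [(mem_occOf_iff_pyGet (by omega)).mp hemem]
      · intro x hx hxe
        rw [PySem.List.mem_pyRange_one] at hx
        by_contra hpx
        rw [Bool.not_eq_false, beq_iff_eq] at hpx
        have hxocc : x ∈ lst := (mem_occOf_iff_pyGet (by omega)).mpr hpx
        rcases List.mem_iff_getElem.mp hxocc with ⟨i, hi, hie⟩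
        have hik : ¬ i < k := by
          intro hik
          have := hbelow i hi hik
          omega
        have h1 : e ≤ lst[i] := by
          rcases Nat.lt_or_ge k i with hc' | hc'
          · exact le_of_lt (List.pairwise_iff_getElem.mp (pairwise_occOf text_tokens token) k i hklt hi hc')
          · have : k = i := by omega
            subst this; rfl
        omega
    rw [hsome, hgd]; rfl

theorem posLoop_getD (W : PySem.Set String) (l : List (Int × String))
    (d : PySem.Dict String (List Int)) (t : String) :
    (l.foldl (fun d p =>
        if W.contains p.2 then d.insert p.2 (d.getD p.2 [] ++ [p.1]) else d) d).getD t [] =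
      d.getD t [] ++
        (if W.contains t then l.filterMap (fun p => if p.2 == t then some p.1 else none) else []) := by
  induction l generalizing d with
  | nil => simp
  | cons p l ih =>
    rw [List.foldl_cons]
    by_cases hW : W.contains p.2
    · rw [if_pos hW, ih]
      have hW' : p.2 ∈ W := by simpa using hW
      by_cases ht : t = p.2
      · subst ht
        rw [PySem.Dict.getD_insert]
        simp [hW', List.append_assoc]
      · rw [PySem.Dict.getD_insert, if_neg ht]
        have hne : ¬ (p.2 = t) := Ne.symm ht
        simp [hne]
    · rw [if_neg hW, ih]
      have hW' : ¬ p.2 ∈ W := by simpa using hW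
      by_cases ht : t = p.2
      · subst ht
        simp [hW']
      · have hne : ¬ (p.2 = t) := Ne.symm ht
        simp [hne]

theorem getD_buildPos (text_tokens : List String) (phrase_tokens : List String) (t : String)
    (ht : t ∈ phrase_tokens) :
    (buildPos text_tokens (PySem.Set.ofList phrase_tokens)).getD t [] =
      occOf text_tokens t := by
  rw [buildPos, posLoop_getD]
  have hc : (PySem.Set.ofList phrase_tokens).contains t = true := by
    simp [PySem.Set.mem_ofList, ht]
  rw [if_pos hc]
  simp [PySem.Dict.getD, PySem.Dict.get?, PySem.Dict.empty, occOf]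

theorem chain_eq (text_tokens : List String) (max_gap : Int) (pos : PySem.Dict String (List Int))
    (tokens : List String) (prev : Int) (hp : 0 ≤ prev)
    (hpos : ∀ t ∈ tokens, pos.getD t [] = occOf text_tokens t) :
    aChain text_tokens max_gap tokens prev =
      decide (0 ≤ bChain pos max_gap tokens prev) := by
  induction tokens generalizing prev with
  | nil =>
    simp [aChain, bChain, hp]
  | cons token rest ih =>
    rw [aChain, bChain]
    rw [hpos token List.mem_cons_self]
    rw [step_eq text_tokens token max_gap prev hp]
    set lst := occOf text_tokens token with hlst
    set k := leftmostGreater lst prev 0 lst.length with hk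
    by_cases hc : k = lst.length ∨ lst.getD k 0 > prev + max_gap + 1
    · rw [if_pos hc, if_pos hc]
      norm_num
    · rw [if_neg hc, if_neg hc]
      have hklt : k < lst.length := by
        rcases not_or.mp hc with ⟨h1, _⟩
        have := (lg_spec lst prev ((pairwise_occOf text_tokens token).imp le_of_lt)).1
        omega
      have hmem : lst.getD k 0 ∈ lst := by
        rw [List.getD_eq_getElem lst 0 hklt]
        exact List.getElem_mem hklt
      have hnn : 0 ≤ lst.getD k 0 := (occOf_mem_bounds hmem).1
      rw [if_neg (by omega)]
      exact ih (lst.getD k 0) hnn (fun t ht => hpos t (List.mem_cons_of_mem token ht))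

theorem ctnn_eq (text_tokens : List String) (token : String) (l : List (Int × String))
    (hl : ∀ p ∈ l, 0 ≤ p.1) :
    ctnnLoop text_tokens token l =
      l.any (fun p =>
        p.2 == token && (p.1 == 0 || (PySem.List.pyGet? text_tokens (p.1 - 1)).getD "" != "non")) := by
  induction l with
  | nil => rfl
  | cons p rest ih =>
    obtain ⟨idx, tok⟩ := p
    have hidx : 0 ≤ idx := hl (idx, tok) List.mem_cons_self
    have ihr := ih (fun q hq => hl q (List.mem_cons_of_mem _ hq))
    rw [List.any_cons, ctnnLoop]
    by_cases htok : tok = token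
    · rw [if_neg (by simp [htok])]
      by_cases hz : idx = 0
      · subst hz
        simp [htok]
      · have hpos : idx > 0 := by omega
        rw [if_pos hpos]
        by_cases hnon : (PySem.List.pyGet? text_tokens (idx - 1)).getD "" = "non"
        · rw [if_pos (by simp [hnon])]
          simp [htok, hnon, hz, ihr]
        · rw [if_neg (by simp [hnon])]
          simp [htok, hnon]
    · rw [if_pos (by simp [htok])]
      simp [htok, ihr]

theorem any_congr_mem {α : Type} (l : List α) (f g : α → Bool)
    (h : ∀ x ∈ l, f x = g x) : l.any f = l.any g := by
  induction l with
  | nil => rfl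
  | cons a t ih =>
    rw [List.any_cons, List.any_cons, h a List.mem_cons_self,
      ih (fun x hx => h x (List.mem_cons_of_mem a hx))]

theorem ports_agree : ∀ (text_tokens : List String) (phrase_tokens : List String) (max_gap : Int),
    contains_ordered_tokens_with_max_gap_py text_tokens phrase_tokens max_gap =
    contains_ordered_tokens_with_max_gap_py_alt text_tokens phrase_tokens max_gap := by
  intro text phrase g
  unfold contains_ordered_tokens_with_max_gap_py contains_ordered_tokens_with_max_gap_py_alt
  match phrase with
  | [] => rfl
  | [t] =>
    simp only [List.isEmpty_cons, List.length_cons, List.length_nil, List.headD_cons]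
    norm_num
    exact ctnn_eq text t _ (by
      intro p hp
      rcases (PySem.List.mem_enumerate_iff _ _ _).mp hp with ⟨k, hk, rfl⟩
      simp)
  | t :: u :: rest =>
    simp only [List.isEmpty_cons, List.length_cons, List.headD_cons,
      List.drop_succ_cons, List.drop_zero]
    norm_num
    rw [getD_buildPos text (t :: u :: rest) t List.mem_cons_self]
    have hpos : ∀ tok ∈ u :: rest,
        (buildPos text (PySem.Set.ofList (t :: u :: rest))).getD tok [] = occOf text tok :=
      fun tok htok => getD_buildPos text _ tok (List.mem_cons_of_mem t htok)
    cases hsp : occOf text t with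
    | nil => simp
    | cons s0 stl =>
      have h1 : (!decide (s0 :: stl = [])) = true := by simp
      rw [h1, Bool.true_and]
      refine any_congr_mem _ _ _ ?_
      intro x hx
      rw [← hsp] at hx
      have hnn := (occOf_mem_bounds hx).1
      exact chain_eq text g _ (u :: rest) x hnn hpos

-- ===== VERDICT (by name: the statement is the Claim_ definition above) =====
theorem contains_ordered_tokens_with_max_gap_py_spec : Claim_equal_contains_ordered_tokens_with_max_gap_py := by
  intro text_tokens phrase_tokens max_gap _dom
  unfold Spec_contains_ordered_tokens_with_max_gap_py
  exact ports_agree text_tokens phrase_tokens max_gap
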